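-- pv_equiv track=rewrite | github.com/KingAdonay/Data-structure-and-algorithms | sorting/FrequencyOfTheMostFrequentElement.py | isValidWindow
-- ===== SOURCE A (Python) =====
-- def isValidWindow(nums, mid, k) -> bool:
--     n = len(nums)
--     windowSum = 0
--     expectedSum = nums[mid - 1] * mid
--
--     for i in range(0, mid):
--         windowSum += nums[i]
--
--     if (expectedSum - windowSum) <= k:
--         return True
--     i = 0
--     j = mid
--     while j < n:
--         windowSum += nums[j]
--         windowSum -= nums[i]
--         expectedSum = nums[j] * mid
--
--         if (expectedSum - windowSum) <= k:
--             return True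
--
--         j += 1
--         i += 1
--
--     return False
-- ===== SOURCE B (Python) =====
-- def isValidWindow(nums, mid, k) -> bool:
--     n = len(nums)
--     P = [0]
--     for x in nums:
--         P.append(P[-1] + x)
--     for start in range(0, n - mid + 1):
--         cost = nums[start + mid - 1] * mid - (P[start + mid] - P[start])
--         if cost <= k:
--             return True
--     return False
-- ===== Notes on version B (the rewrite author's own statement) =====
-- stated objective: alternative
-- what changed: Replaces the sliding-window running sum (special-cased first window plus incremental add/subtract updates) by a precomputed prefix-sum table and one uniform indexed scan over all window starts.
-- outside the precondition, e.g. on isValidWindow([3, 3, -3, 3], -1, -9): A returns True, B raises IndexError; on isValidWindow([1], 2, 0): A raises IndexError, B returns False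
import Mathlib
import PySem

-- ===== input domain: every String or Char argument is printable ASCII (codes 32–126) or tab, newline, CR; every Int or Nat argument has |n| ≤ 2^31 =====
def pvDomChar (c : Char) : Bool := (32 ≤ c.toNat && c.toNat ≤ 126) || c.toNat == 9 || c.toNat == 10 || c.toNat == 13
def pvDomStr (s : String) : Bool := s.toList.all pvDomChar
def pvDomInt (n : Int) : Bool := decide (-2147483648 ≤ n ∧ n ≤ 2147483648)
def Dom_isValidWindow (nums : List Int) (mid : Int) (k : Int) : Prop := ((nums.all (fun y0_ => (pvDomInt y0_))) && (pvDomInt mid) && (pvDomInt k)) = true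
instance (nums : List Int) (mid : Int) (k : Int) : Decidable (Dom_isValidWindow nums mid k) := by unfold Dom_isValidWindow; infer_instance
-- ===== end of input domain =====

-- B replaces A's sliding-window running sum by a prefix-sum table and one uniform scan over window starts (alternative decomposition, same O(n) cost).


-- ===== PORT A =====
-- the 'while j < n' loop of A, carrying (windowSum, i, j)
def isValidWindowLoopA (nums : List Int) (mid k n : Int) (ws i j : Int) : Bool :=
  if h : j < n then
    let ws' := ws + PySem.List.pyGetD nums j 0 - PySem.List.pyGetD nums i 0
    if PySem.List.pyGetD nums j 0 * mid - ws' ≤ k then true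
    else isValidWindowLoopA nums mid k n ws' (i + 1) (j + 1)
  else false
termination_by (n - j).toNat
decreasing_by omega

def isValidWindow (nums : List Int) (mid : Int) (k : Int) : Bool :=
  let n : Int := nums.length
  let expectedSum := PySem.List.pyGetD nums (mid - 1) 0 * mid
  let windowSum := (PySem.List.pyRange 0 mid 1).foldl (fun s i => s + PySem.List.pyGetD nums i 0) 0
  if expectedSum - windowSum ≤ k then true
  else isValidWindowLoopA nums mid k n windowSum 0 mid

-- ===== PORT B =====
-- P = [0]; for x in nums: P.append(P[-1] + x)
def isValidWindowBuildP (nums : List Int) : List Int :=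
  nums.foldl (fun P x => P ++ [PySem.List.pyGetD P (-1) 0 + x]) [0]

-- 'for start in range(...)' with early return
def isValidWindowLoopB (nums P : List Int) (mid k : Int) : List Int → Bool
  | [] => false
  | s :: rest =>
    if PySem.List.pyGetD nums (s + mid - 1) 0 * mid -
        (PySem.List.pyGetD P (s + mid) 0 - PySem.List.pyGetD P s 0) ≤ k then true
    else isValidWindowLoopB nums P mid k rest

def isValidWindow_alt (nums : List Int) (mid : Int) (k : Int) : Bool :=
  let n : Int := nums.length
  let P := isValidWindowBuildP nums
  isValidWindowLoopB nums P mid k (PySem.List.pyRange 0 (n - mid + 1) 1)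

-- ===== PRECONDITION & SPEC =====
-- Pre_ excludes negative mid (negative-index wraparound is accidental: A returns True via wrapped windows or raises IndexError mid-loop, B may raise), mid > len(nums) (A always raises IndexError there), and empty nums (both raise).
def Pre_isValidWindow (nums : List Int) (mid : Int) (k : Int) : Prop :=
  0 ≤ mid ∧ mid ≤ (nums.length : Int) ∧ nums ≠ []
instance (nums : List Int) (mid : Int) (k : Int) : Decidable (Pre_isValidWindow nums mid k) := by
  unfold Pre_isValidWindow; infer_instance
def pvWitness_isValidWindow : List Int × Int × Int := ([1, 2, 3], 2, 1)

def Spec_isValidWindow (nums : List Int) (mid : Int) (k : Int) (out : Bool) : Prop := out = isValidWindow_alt nums mid k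
instance (nums : List Int) (mid : Int) (k : Int) (out : Bool) : Decidable (Spec_isValidWindow nums mid k out) := by unfold Spec_isValidWindow; infer_instance

-- ===== CLAIM (what is proved, stated in full; the proofs are below) =====
def Claim_equal_isValidWindow : Prop := ∀ (nums : List Int) (mid : Int) (k : Int), Dom_isValidWindow nums mid k → Pre_isValidWindow nums mid k → Spec_isValidWindow nums mid k (isValidWindow nums mid k)

-- ===== LEMMAS AND PROOFS =====

-- prefix sums: T nums t = sum of nums[0:t]
def pvT (nums : List Int) (t : Int) : Int := ((nums.take t.toNat).sum)

theorem pvT_succ (nums : List Int) (t : Int) (h0 : 0 ≤ t) (h1 : t < (nums.length : Int)) :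
    pvT nums (t + 1) = pvT nums t + PySem.List.pyGetD nums t 0 := by
  have ht : (t + 1).toNat = t.toNat + 1 := by omega
  have hlt : t.toNat < nums.length := by omega
  rw [pvT, pvT, ht, List.sum_take_succ nums t.toNat hlt,
    PySem.List.pyGetD_eq_getElem nums 0 h0 h1]

theorem buildP_foldl (l : List Int) : ∀ (acc : List Int) (s : Int),
    l.foldl (fun P x => P ++ [PySem.List.pyGetD P (-1) 0 + x]) (acc ++ [s]) =
      acc ++ List.scanl (· + ·) s l := by
  induction l with
  | nil => intro acc s; simp [List.scanl_nil]
  | cons x xs ih =>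
    intro acc s
    rw [List.foldl_cons, PySem.List.pyGetD_neg_one_append_singleton,
      ih (acc ++ [s]) (s + x), List.scanl_cons]
    simp

theorem buildP_eq (nums : List Int) : isValidWindowBuildP nums = List.scanl (· + ·) 0 nums := by
  have := buildP_foldl nums [] 0
  simpa [isValidWindowBuildP] using this

theorem scanl_getD (l : List Int) : ∀ (s : Int) (t : Nat), t ≤ l.length →
    (List.scanl (· + ·) s l).getD t 0 = s + (l.take t).sum := by
  induction l with
  | nil =>
    intro s t h
    have : t = 0 := by simpa using h
    subst this
    simp [List.scanl_nil]
  | cons x xs ih =>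
    intro s t h
    cases t with
    | zero => simp [List.scanl_cons]
    | succ t =>
      rw [List.scanl_cons]
      have hgd : (s :: List.scanl (· + ·) (s + x) xs).getD (t + 1) 0 =
          (List.scanl (· + ·) (s + x) xs).getD t 0 := rfl
      rw [hgd, ih (s + x) t (by simpa using h)]
      simp
      ring

theorem P_getD (nums : List Int) (t : Int) (h0 : 0 ≤ t) (h1 : t ≤ (nums.length : Int)) :
    PySem.List.pyGetD (isValidWindowBuildP nums) t 0 = pvT nums t := by
  have hlen : (isValidWindowBuildP nums).length = nums.length + 1 := by
    rw [buildP_eq]; simp [List.length_scanl]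
  have h2 : t < ((isValidWindowBuildP nums).length : Int) := by
    rw [hlen]; push_cast; omega
  rw [PySem.List.pyGetD_eq_getElem _ 0 h0 h2]
  have hlt : t.toNat < (isValidWindowBuildP nums).length := by omega
  rw [← List.getD_eq_getElem _ 0 hlt, buildP_eq, scanl_getD nums 0 t.toNat (by omega)]
  simp [pvT]

theorem windowSum0_eq (nums : List Int) : ∀ (m : Nat), (m : Int) ≤ (nums.length : Int) →
    (PySem.List.pyRange 0 m 1).foldl (fun s i => s + PySem.List.pyGetD nums i 0) 0 = pvT nums m := by
  intro m
  induction m with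
  | zero =>
    intro _
    rw [PySem.List.pyRange_one_eq_nil (by omega)]
    simp [pvT]
  | succ m ih =>
    intro h
    have h1 : ((m : Int)) ≤ (nums.length : Int) := by push_cast at h ⊢; omega
    have hcast : ((m + 1 : Nat) : Int) = ((m : Int)) + 1 := by push_cast; ring
    rw [hcast, PySem.List.pyRange_one_succ_right (a := 0) (b := (m : Int)) (by omega),
      List.foldl_append, ih h1]
    simp only [List.foldl_cons, List.foldl_nil]
    rw [← hcast, show ((m + 1 : Nat) : Int) = (m : Int) + 1 from by push_cast; ring,
      pvT_succ nums m (by omega) (by push_cast at h ⊢; omega)]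

-- the bridge: A's loop at state (i = s, j = s + mid, ws = T(s+mid) - T(s)) equals B's loop on the remaining starts s+1, …, n-mid
theorem bridge (nums : List Int) (mid k : Int) (hm0 : 0 ≤ mid) :
    ∀ (fuel : Nat) (s ws : Int), 0 ≤ s → s + mid ≤ (nums.length : Int) →
    ws = pvT nums (s + mid) - pvT nums s → fuel = (((nums.length : Int)) - (s + mid)).toNat →
    isValidWindowLoopA nums mid k (nums.length : Int) ws s (s + mid) =
      isValidWindowLoopB nums (isValidWindowBuildP nums) mid k
        (PySem.List.pyRange (s + 1) ((nums.length : Int) - mid + 1) 1) := by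
  intro fuel
  induction fuel with
  | zero =>
    intro s ws hs0 hsn hws hfuel
    have hge : ¬ (s + mid < (nums.length : Int)) := by omega
    rw [isValidWindowLoopA, dif_neg hge,
      PySem.List.pyRange_one_eq_nil (by omega), isValidWindowLoopB]
  | succ f ih =>
    intro s ws hs0 hsn hws hfuel
    by_cases hlt : s + mid < (nums.length : Int)
    · rw [isValidWindowLoopA, dif_pos hlt]
      have hcons : PySem.List.pyRange (s + 1) ((nums.length : Int) - mid + 1) 1 =
          (s + 1) :: PySem.List.pyRange (s + 1 + 1) ((nums.length : Int) - mid + 1) 1 :=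
        PySem.List.pyRange_one_cons (by omega)
      rw [hcons, isValidWindowLoopB]
      have hws' : ws + PySem.List.pyGetD nums (s + mid) 0 - PySem.List.pyGetD nums s 0 =
          pvT nums (s + 1 + mid) - pvT nums (s + 1) := by
        have e1 : pvT nums (s + mid + 1) = pvT nums (s + mid) + PySem.List.pyGetD nums (s + mid) 0 :=
          pvT_succ nums (s + mid) (by omega) hlt
        have e2 : pvT nums (s + 1) = pvT nums s + PySem.List.pyGetD nums s 0 :=
          pvT_succ nums s hs0 (by omega)
        have : s + 1 + mid = s + mid + 1 := by ring
        rw [this, e1, e2, hws]; ring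
      have hPj : PySem.List.pyGetD (isValidWindowBuildP nums) (s + 1 + mid) 0 = pvT nums (s + 1 + mid) :=
        P_getD nums _ (by omega) (by omega)
      have hPs : PySem.List.pyGetD (isValidWindowBuildP nums) (s + 1) 0 = pvT nums (s + 1) :=
        P_getD nums _ (by omega) (by omega)
      have hidx : s + 1 + mid - 1 = s + mid := by ring
      rw [hidx, hPj, hPs, ← hws']
      by_cases hc : PySem.List.pyGetD nums (s + mid) 0 * mid -
          (ws + PySem.List.pyGetD nums (s + mid) 0 - PySem.List.pyGetD nums s 0) ≤ k
      · rw [if_pos hc, if_pos hc]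
      · rw [if_neg hc, if_neg hc]
        have := ih (s + 1) (ws + PySem.List.pyGetD nums (s + mid) 0 - PySem.List.pyGetD nums s 0)
          (by omega) (by omega) hws' (by omega)
        have harg : s + 1 + mid = s + mid + 1 := by ring
        rw [harg] at this
        simpa using this
    · rw [isValidWindowLoopA, dif_neg hlt,
        PySem.List.pyRange_one_eq_nil (by omega), isValidWindowLoopB]

-- ===== VERDICT (by name: the statement is the Claim_ definition above) =====
theorem isValidWindow_spec : Claim_equal_isValidWindow := by
  intro nums mid k _ hpre
  obtain ⟨hm0, hmn, hne⟩ := hpre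
  unfold Spec_isValidWindow isValidWindow isValidWindow_alt
  simp only []
  have hW : (PySem.List.pyRange 0 mid 1).foldl (fun s i => s + PySem.List.pyGetD nums i 0) 0 =
      pvT nums mid := by
    have hcast : mid = ((mid.toNat : Nat) : Int) := by omega
    rw [hcast]
    exact windowSum0_eq nums mid.toNat (by omega)
  have hcons : PySem.List.pyRange 0 ((nums.length : Int) - mid + 1) 1 =
      0 :: PySem.List.pyRange 1 ((nums.length : Int) - mid + 1) 1 := by
    have := PySem.List.pyRange_one_cons (a := 0) (b := (nums.length : Int) - mid + 1) (by omega)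
    simpa using this
  rw [hcons, isValidWindowLoopB]
  have hP0 : PySem.List.pyGetD (isValidWindowBuildP nums) 0 0 = pvT nums 0 :=
    P_getD nums 0 (by omega) (by omega)
  have hPm : PySem.List.pyGetD (isValidWindowBuildP nums) (0 + mid) 0 = pvT nums mid := by
    have := P_getD nums (0 + mid) (by omega) (by omega)
    simpa using this
  have hT0 : pvT nums 0 = 0 := by simp [pvT]
  rw [hPm, hP0, hT0]
  have hidx : (0 : Int) + mid - 1 = mid - 1 := by ring
  rw [hidx, hW]
  by_cases hc : PySem.List.pyGetD nums (mid - 1) 0 * mid - pvT nums mid ≤ k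
  · rw [if_pos (by simpa using hc), if_pos (by simpa using hc)]
  · rw [if_neg (by simpa using hc), if_neg (by simpa using hc)]
    have := bridge nums mid k hm0 (((nums.length : Int)) - (0 + mid)).toNat 0 (pvT nums mid)
      (by omega) (by omega) (by rw [hT0]; simp) rfl
    simpa using this
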